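-- pv_equiv track=rewrite | github.com/seoyeonKK/Algorithm | python/[2019 Kakao 개발자 겨울 인턴쉽] 튜플.py | solution
-- ===== SOURCE A (Python) =====
-- def solution(s):
--     answer = []
--     seen = set()
--
--     l = s.replace("{{","").replace("}}","").split("},{")
--     l.sort(key=len)
--
--     for i in range(0,len(l)):
--         k = l[i].split(',')
--
--         for j in range(0, len(k)):
--             if k[j] not in seen:
--                 answer.append(int(k[j]))
--                 seen.add(k[j])
--
--     return answer
-- ===== SOURCE B (Python) =====
-- def solution(s):
--     groups = s.replace("{{", "").replace("}}", "").split("},{")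
--     maxlen = 0
--     for g in groups:
--         maxlen = max(maxlen, len(g))
--     toks = []
--     for L in range(maxlen + 1):
--         for g in groups:
--             if len(g) == L:
--                 toks.extend(g.split(','))
--     return [int(t) for t in dict.fromkeys(toks)]
-- ===== Notes on version B (the rewrite author's own statement) =====
-- stated objective: alternative
-- what changed: Replaces A's stable length-sort plus online seen-set/append loop by a counting-sort-style bucket pass over group lengths followed by one ordered dedup (dict.fromkeys) of all tokens and a single int() map.
import Mathlib
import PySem

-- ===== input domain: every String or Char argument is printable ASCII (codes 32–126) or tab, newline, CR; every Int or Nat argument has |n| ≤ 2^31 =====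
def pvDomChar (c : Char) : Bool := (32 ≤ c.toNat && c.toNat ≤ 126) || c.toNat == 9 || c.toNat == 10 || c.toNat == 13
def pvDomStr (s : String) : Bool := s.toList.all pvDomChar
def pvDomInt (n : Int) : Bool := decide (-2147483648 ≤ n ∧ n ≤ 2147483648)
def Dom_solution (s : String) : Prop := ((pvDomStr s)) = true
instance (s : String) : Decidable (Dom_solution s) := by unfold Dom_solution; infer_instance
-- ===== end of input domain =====

-- B replaces A's length-sort + online seen-set by a bucket pass over group lengths
-- (counting-sort style) followed by an ordered dedup of all tokens and one int() map;
-- same return value wherever A returns (objective: alternative decomposition, not speed).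

-- ===== PORT A =====
-- the shared preprocessing of A's first line: s.replace("{{","").replace("}}","").split("},{")
def pvGroups (s : String) : List (List Char) :=
  PySem.Chars.splitOn
    (PySem.Chars.replace (PySem.Chars.replace s.toList "{{".toList []) "}}".toList [])
    "},{".toList

def solution (s : String) : List Int :=
  let l := PySem.List.sorted (pvGroups s) (fun g => g.length) false
  let st := (PySem.List.pyRange 0 (PySem.List.len l)).foldl
    (fun (st : List Int × PySem.Set (List Char)) i =>
      let k := PySem.Chars.splitOn (PySem.List.pyGetD l i []) [',']
      (PySem.List.pyRange 0 (PySem.List.len k)).foldl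
        (fun (st : List Int × PySem.Set (List Char)) j =>
          let t := PySem.List.pyGetD k j []
          if !st.2.contains t then
            (st.1 ++ [(PySem.Int.ofChars? t).getD 0], st.2.add t)
          else st) st)
    ([], PySem.Set.empty)
  st.1

-- ===== PORT B =====
def solution_alt (s : String) : List Int :=
  let groups := pvGroups s
  let maxlen : Nat := groups.foldl (fun m g => max m g.length) 0
  let toks := (PySem.List.pyRange 0 ((maxlen : Int) + 1)).foldl
    (fun acc L =>
      groups.foldl
        (fun acc g =>
          if ((g.length : Int) == L) then acc ++ PySem.Chars.splitOn g [','] else acc)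
        acc)
    []
  (PySem.List.dedup toks).map (fun t => (PySem.Int.ofChars? t).getD 0)

-- ===== PRECONDITION & SPEC =====
-- Pre_ excludes exactly the inputs on which Python A raises ValueError: some comma-token
-- of some group is not an int literal (then int() fails on its first occurrence).
def Pre_solution (s : String) : Prop :=
  ∀ g ∈ pvGroups s, ∀ t ∈ PySem.Chars.splitOn g [','], PySem.Int.ofChars? t ≠ none
instance (s : String) : Decidable (Pre_solution s) := by unfold Pre_solution; infer_instance
def pvWitness_solution : String := "{{2},{2,1},{2,1,3}}"

def Spec_solution (s : String) (out : List Int) : Prop := out = solution_alt s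
instance (s : String) (out : List Int) : Decidable (Spec_solution s out) := by unfold Spec_solution; infer_instance

-- ===== CLAIM (what is proved, stated in full; the proofs are below) =====
def Claim_equal_solution : Prop := ∀ (s : String), Dom_solution s → Pre_solution s → Spec_solution s (solution s)

-- ===== LEMMAS AND PROOFS =====

-- ordered first-occurrence dedup relative to an already-seen list
def pvDD (seen : List (List Char)) : List (List Char) → List (List Char)
  | [] => []
  | t :: r => if seen.contains t then pvDD seen r else t :: pvDD (seen ++ [t]) r

-- A's inner token loop: append unseen tokens (converted) and record them
theorem pvA_fold (ts : List (List Char)) : ∀ (ans : List Int) (seen : List (List Char)),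
    ts.foldl (fun (st : List Int × PySem.Set (List Char)) t =>
        if !st.2.contains t then (st.1 ++ [(PySem.Int.ofChars? t).getD 0], st.2.add t) else st)
      (ans, seen)
    = (ans ++ (pvDD seen ts).map (fun t => (PySem.Int.ofChars? t).getD 0), seen ++ pvDD seen ts) := by
  induction ts with
  | nil => intro ans seen; simp [pvDD]
  | cons t r ih =>
    intro ans seen
    rw [List.foldl_cons]
    by_cases h : t ∈ seen
    · have e : (if !(PySem.Set.contains seen t) then
          (ans ++ [(PySem.Int.ofChars? t).getD 0], PySem.Set.add seen t) else (ans, seen)) = (ans, seen) := by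
        simp [PySem.Set.contains, h]
      rw [e, ih]; simp [pvDD, h]
    · have e : (if !(PySem.Set.contains seen t) then
          (ans ++ [(PySem.Int.ofChars? t).getD 0], PySem.Set.add seen t) else (ans, seen))
          = (ans ++ [(PySem.Int.ofChars? t).getD 0], seen ++ [t]) := by
        simp [PySem.Set.contains, PySem.Set.add, h]
      rw [e, ih]; simp [pvDD, h]

-- B's dedup is pvDD from the empty seen-list
theorem pvOfList_dd (ts : List (List Char)) : ∀ (seen : List (List Char)),
    ts.foldl PySem.Set.add seen = seen ++ pvDD seen ts := by
  induction ts with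
  | nil => intro seen; simp [pvDD]
  | cons t r ih =>
    intro seen
    by_cases h : t ∈ seen
    · simp [PySem.Set.add, h, pvDD, ih]
    · simp [PySem.Set.add, h, pvDD, ih]

-- insertBy walks past a prefix it does not insert into
theorem pvInsertBy_append (before : List Char → List Char → Bool) (x : List Char)
    (P Q : List (List Char)) (hP : ∀ y ∈ P, before x y = false) :
    PySem.List.insertBy before x (P ++ Q) = P ++ PySem.List.insertBy before x Q := by
  induction P with
  | nil => simp
  | cons p P ih =>
    have hp : before x p = false := hP p (by simp)
    simp [PySem.List.insertBy, hp, ih (fun y hy => hP y (by simp [hy]))]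

theorem pvInsertBy_all (before : List Char → List Char → Bool) (x : List Char)
    (Q : List (List Char)) (hQ : ∀ y ∈ Q, before x y = true) :
    PySem.List.insertBy before x Q = x :: Q := by
  cases Q with
  | nil => simp [PySem.List.insertBy]
  | cons q Q => simp [PySem.List.insertBy, hQ q (by simp)]

def pvBuckets (gs : List (List Char)) (n : Nat) : List (List Char) :=
  (List.range (n + 1)).flatMap (fun L => gs.filter (fun g => g.length == L))

-- the stable length-sort is the concatenation of the length buckets
theorem pvSorted_buckets (gs : List (List Char)) (n : Nat) :
    (∀ g ∈ gs, g.length ≤ n) →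
    PySem.List.sorted gs (fun g => g.length) false = pvBuckets gs n := by
  induction gs using List.reverseRecOn with
  | nil => intro _; simp [pvBuckets, PySem.List.sorted]
  | append_singleton gs x ih =>
    intro h
    have hgs : ∀ g ∈ gs, g.length ≤ n := fun g hg => h g (by simp [hg])
    have hlx : x.length ≤ n := h x (by simp)
    have hsorted : PySem.List.sorted (gs ++ [x]) (fun g => g.length) false
        = PySem.List.insertBy (fun a b => decide (a.length < b.length)) x
            (PySem.List.sorted gs (fun g => g.length) false) := by
      rw [PySem.List.sorted_eq_foldl_insertBy, PySem.List.sorted_eq_foldl_insertBy, List.foldl_append]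
      rfl
    have hr : List.range (n + 1) = List.range x.length ++ [x.length]
        ++ (List.range (n - x.length)).map (fun k => x.length + 1 + k) := by
      rw [show n + 1 = x.length + 1 + (n - x.length) by omega, List.range_add, List.range_add]
      simp [List.range_one]
    rw [hsorted, ih hgs]
    unfold pvBuckets
    rw [hr]
    simp only [List.flatMap_append, List.flatMap_cons, List.flatMap_nil, List.append_nil]
    have hPfalse : ∀ y ∈ (List.range x.length).flatMap
          (fun L => gs.filter (fun g => g.length == L))
        ++ gs.filter (fun g => g.length == x.length),
        (fun a b => decide (a.length < b.length)) x y = false := by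
      intro y hy
      rcases List.mem_append.mp hy with hy | hy
      · obtain ⟨L, hL, hyF⟩ := List.mem_flatMap.mp hy
        have h1 : y.length = L := by simpa using (List.mem_filter.mp hyF).2
        have h2 := List.mem_range.mp hL
        simp only [decide_eq_false_iff_not]; omega
      · have h1 : y.length = x.length := by simpa using (List.mem_filter.mp hy).2
        simp only [decide_eq_false_iff_not]; omega
    have hQtrue : ∀ y ∈ ((List.range (n - x.length)).map (fun k => x.length + 1 + k)).flatMap
          (fun L => gs.filter (fun g => g.length == L)),
        (fun a b => decide (a.length < b.length)) x y = true := by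
      intro y hy
      obtain ⟨L, hL, hyF⟩ := List.mem_flatMap.mp hy
      have h1 : y.length = L := by simpa using (List.mem_filter.mp hyF).2
      obtain ⟨k, _, hk⟩ := List.mem_map.mp hL
      simp only [decide_eq_true_eq]; omega
    rw [pvInsertBy_append _ _ _ _ hPfalse, pvInsertBy_all _ _ _ hQtrue]
    have hmid : (gs ++ [x]).filter (fun g => g.length == x.length)
        = gs.filter (fun g => g.length == x.length) ++ [x] := by
      simp [List.filter_append]
    have hside : ∀ R : List Nat, x.length ∉ R →
        R.flatMap (fun L => (gs ++ [x]).filter (fun g => g.length == L))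
        = R.flatMap (fun L => gs.filter (fun g => g.length == L)) := by
      intro R hR
      induction R with
      | nil => simp
      | cons L R ihR =>
        have hne : x.length ≠ L := fun he => hR (by simp [he])
        rw [List.flatMap_cons, List.flatMap_cons, ihR (fun hm => hR (by simp [hm]))]
        congr 1
        rw [List.filter_append]
        simp [hne]
    rw [hmid, hside (List.range x.length) (by simp), hside _ (by
      intro hm
      obtain ⟨k, _, hk⟩ := List.mem_map.mp hm
      omega)]
    simp

theorem pvMax_bound (gs : List (List Char)) :
    ∀ g ∈ gs, g.length ≤ gs.foldl (fun m g => max m g.length) 0 := by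
  intro g hg
  have := (PySem.List.le_foldl_max (gs.map (fun g => g.length)) 0).2 g.length
    (List.mem_map_of_mem hg)
  simpa [List.foldl_map] using this

-- B's inner loop over the groups keeps the current-length ones, flattened into tokens
theorem pvB_inner (gs : List (List Char)) (L : Int) (acc : List (List Char)) :
    gs.foldl (fun acc g => if ((g.length : Int) == L) then acc ++ PySem.Chars.splitOn g [','] else acc) acc
    = acc ++ (gs.filter (fun g => (g.length : Int) == L)).flatMap (fun g => PySem.Chars.splitOn g [',']) := by
  induction gs generalizing acc with
  | nil => simp
  | cons g gs ih =>
    rw [List.foldl_cons]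
    by_cases h : ((g.length : Int) = L)
    · have e : (if ((g.length : Int) == L) then acc ++ PySem.Chars.splitOn g [','] else acc)
          = acc ++ PySem.Chars.splitOn g [','] := by simp [h]
      rw [e, ih]; simp [h]
    · have e : (if ((g.length : Int) == L) then acc ++ PySem.Chars.splitOn g [','] else acc) = acc := by
        simp [h]
      rw [e, ih]; simp [h]

-- A computes: convert the first-occurrence tokens of the length-sorted groups, in order
theorem pvA_char (s : String) :
    solution s = (pvDD [] ((PySem.List.sorted (pvGroups s) (fun g => g.length) false).flatMap
        (fun g => PySem.Chars.splitOn g [',']))).map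
      (fun t => (PySem.Int.ofChars? t).getD 0) := by
  unfold solution
  dsimp only
  have h1 := PySem.List.foldl_pyRange_zero_pyGetD
    (xs := PySem.List.sorted (pvGroups s) (fun g => g.length) false) (d := ([] : List Char))
    (f := fun (st : List Int × PySem.Set (List Char)) g =>
      (PySem.List.pyRange 0 (PySem.List.len (PySem.Chars.splitOn g [',']))).foldl
        (fun st j =>
          let t := PySem.List.pyGetD (PySem.Chars.splitOn g [',']) j []
          if !st.2.contains t then (st.1 ++ [(PySem.Int.ofChars? t).getD 0], st.2.add t) else st) st)
    (init := (([] : List Int), (PySem.Set.empty : PySem.Set (List Char))))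
  simp only [h1]
  rw [PySem.List.foldl_congr_mem _ _
    (fun (st : List Int × PySem.Set (List Char)) g => (PySem.Chars.splitOn g [',']).foldl
      (fun st t =>
        if !st.2.contains t then (st.1 ++ [(PySem.Int.ofChars? t).getD 0], st.2.add t) else st) st)
    _ (fun st g _ => PySem.List.foldl_pyRange_zero_pyGetD _ _ _ _)]
  rw [← List.foldl_flatMap]
  rw [pvA_fold]
  simp

-- B computes: convert the first-occurrence tokens of the length-bucketed groups, in order
theorem pvB_char (s : String) :
    solution_alt s = (pvDD [] ((pvBuckets (pvGroups s)
        ((pvGroups s).foldl (fun m g => max m g.length) 0)).flatMap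
        (fun g => PySem.Chars.splitOn g [',']))).map
      (fun t => (PySem.Int.ofChars? t).getD 0) := by
  unfold solution_alt
  dsimp only
  rw [show ((((pvGroups s).foldl (fun m g => max m g.length) 0 : Nat) : Int) + 1)
      = (((pvGroups s).foldl (fun m g => max m g.length) 0 + 1 : Nat) : Int) by push_cast; ring]
  rw [PySem.List.pyRange_zero_natCast, List.foldl_map]
  rw [PySem.List.foldl_congr_mem _ _
    (fun acc k => acc ++ ((pvGroups s).filter (fun g => g.length == k)).flatMap
      (fun g => PySem.Chars.splitOn g [',']))
    _ (by
      intro acc k _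
      rw [pvB_inner (pvGroups s) (k : Int) acc]
      congr 1
      congr 1
      apply List.filter_congr
      intro g _
      simp)]
  rw [PySem.List.foldl_append_eq_flatMap]
  rw [PySem.List.dedup_eq_ofList]
  unfold PySem.Set.ofList
  rw [pvOfList_dd]
  unfold pvBuckets
  rw [List.flatMap_assoc]
  simp

-- ===== VERDICT (by name: the statement is the Claim_ definition above) =====
theorem solution_spec : Claim_equal_solution := by
  unfold Claim_equal_solution
  intro s _ _
  unfold Spec_solution
  rw [pvA_char, pvB_char, pvSorted_buckets (pvGroups s) _ (pvMax_bound (pvGroups s))]
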